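-- pv_equiv track=rewrite | github.com/DPNT-Sourcecode/CHK-nobx01 | lib/solutions/CHK/checkout_solution.py | apply_free_items
-- ===== SOURCE A (Python) =====
-- FREE_ITEM_KEY = 'free_item'
--
-- PRICES = {
--     'A':{'price': 50, 'offers': [{'quantity': 3, 'price': 130}, {'quantity': 5, 'price': 200}]},
--     'B':{'price': 30, 'offers': [{'quantity': 2, 'price': 45}]},
--     'C':{'price': 20, 'offers': None},
--     'D':{'price': 15, 'offers': None},
--     'E':{'price': 40, 'offers': [{'quantity': 2, FREE_ITEM_KEY: 'B'}]},
--     'F':{'price': 10, 'offers': [{'quantity': 2, FREE_ITEM_KEY: 'F'}]},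
--     'G':{'price': 20, 'offers': None},
--     'H':{'price': 10, 'offers': [{'quantity': 5, 'price': 45}, {'quantity': 10, 'price': 80}]},
--     'I':{'price': 35, 'offers': None},
--     'J':{'price': 60, 'offers': None},
--     'K':{'price': 70, 'offers': [{'quantity': 2, 'price': 120}]},
--     'L':{'price': 90, 'offers': None},
--     'M':{'price': 15, 'offers': None},
--     'N':{'price': 40, 'offers': [{'quantity': 3, FREE_ITEM_KEY: 'M'}]},
--     'O':{'price': 10, 'offers': None},
--     'P':{'price': 50, 'offers': [{'quantity': 5, 'price': 200}]},
--     'Q':{'price': 30, 'offers': [{'quantity': 3, 'price': 80}]},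
--     'R':{'price': 50, 'offers': [{'quantity': 3, FREE_ITEM_KEY: 'Q'}]},
--     'S':{'price': 20, 'offers': [{'group': ['S', 'T', 'X', 'Y', 'Z'], 'price': 45, 'quantity': 3}]},
--     'T':{'price': 20, 'offers': [{'group': ['S', 'T', 'X', 'Y', 'Z'], 'price': 45, 'quantity': 3}]},
--     'U':{'price': 40, 'offers': [{'quantity': 3, FREE_ITEM_KEY: 'U'}]},
--     'V':{'price': 50, 'offers': [{'quantity': 2, 'price': 90}, {'quantity': 3, 'price': 130}]},
--     'W':{'price': 20, 'offers': None},
--     'X':{'price': 17, 'offers': [{'group': ['S', 'T', 'X', 'Y', 'Z'], 'price': 45, 'quantity': 3}]},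
--     'Y':{'price': 20, 'offers': [{'group': ['S', 'T', 'X', 'Y', 'Z'], 'price': 45, 'quantity': 3}]},
--     'Z':{'price': 21, 'offers': [{'group': ['S', 'T', 'X', 'Y', 'Z'], 'price': 45, 'quantity': 3}]},
-- }
--
-- def get_items_with_free_item() -> list:
--     """
--     Although the PRICES dictionary is defined, this function programmatically extracts a list of the items that
--     when purchased result in other free items.
--     """
--     items_with_free_item = [
--         item
--         for item, data in PRICES.items()
--         if data.get('offers') and any(FREE_ITEM_KEY in offer for offer in data['offers'])
--     ]
--     return items_with_free_item
--
-- def get_offer_with_free_item(offers: list) -> dict: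
--     """
--     Given a list of dictionaries, return the one with the key 'free_item'
--     """
--     return next((d for d in offers if FREE_ITEM_KEY in d), None)
--
-- def apply_free_items(counted_items):
--     """
--     Remove from counted_items the qualified free items, where applicable. The case of an item possessing a
--     free offer for itself is treated separately.
--     """
--     items_with_free_item = get_items_with_free_item()
--     for item in items_with_free_item:
--         if item in counted_items:
--             offers = PRICES[item]['offers']
--             offer = get_offer_with_free_item(offers)
--             free_sku = offer[FREE_ITEM_KEY]
--             # item==free_sku is an 'activation switch', if True it represents the case of free self item e.g. case F
--             offer_quantity = counted_items[item] // (offer['quantity'] + (item == free_sku))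
--             if free_sku in counted_items:
--                 counted_items[free_sku] -= min(counted_items[free_sku], offer_quantity)
--     return counted_items
-- ===== SOURCE B (Python) =====
-- # B drives the loop over the basket with a constant rule table keyed by the FREE TARGET:
-- # for each purchased SKU that is the free item of some offer, deduct source_count // divisor
-- # (capped at zero) from its count.  The five rules are the free-item offers of PRICES with the
-- # divisor pre-folded (quantity + 1 for self-referential offers).  Mutates counted_items in
-- # place and returns it, like A.
-- FREE_SOURCE_BY_TARGET = {
--     'B': ('E', 2),   # every 2 E's give one B free
--     'F': ('F', 3),   # every 2 F's give one F free (divisor 3: the free F is in the basket)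
--     'M': ('N', 3),
--     'Q': ('R', 3),
--     'U': ('U', 4),
-- }
--
-- def apply_free_items(counted_items):
--     for sku in counted_items:
--         rule = FREE_SOURCE_BY_TARGET.get(sku)
--         if rule is not None and rule[0] in counted_items:
--             src, div = rule
--             counted_items[sku] = max(0, counted_items[sku] - counted_items[src] // div)
--     return counted_items
-- ===== Notes on version B (the rewrite author's own statement) =====
-- stated objective: simpler
-- what changed: B replaces A's scan of the constant price table (with its two helper rescans for the free-item offer) by a single loop over the basket itself, looking each purchased SKU up in a five-entry constant table keyed by the FREE TARGET with the divisor pre-folded, and writes max(0,count-src//div) directly instead of subtracting min(count,quantity). Pre_ only excludes association lists with duplicate keys, which represent no Python dict input.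
import Mathlib
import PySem

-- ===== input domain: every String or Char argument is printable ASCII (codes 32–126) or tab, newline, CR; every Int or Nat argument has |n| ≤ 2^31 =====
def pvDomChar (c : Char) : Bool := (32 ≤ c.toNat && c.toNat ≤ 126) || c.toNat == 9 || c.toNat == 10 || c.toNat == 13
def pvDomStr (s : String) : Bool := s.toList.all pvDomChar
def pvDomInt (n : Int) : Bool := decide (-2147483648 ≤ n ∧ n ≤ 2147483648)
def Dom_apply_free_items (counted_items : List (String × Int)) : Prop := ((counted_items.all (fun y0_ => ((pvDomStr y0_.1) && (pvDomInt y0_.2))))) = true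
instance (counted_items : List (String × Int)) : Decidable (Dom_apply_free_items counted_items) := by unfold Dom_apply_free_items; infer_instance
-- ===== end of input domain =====

-- B replaces A's scan of the constant price table (with its helper rescans for the free-item
-- offer) by a single loop over the basket, looking each purchased SKU up in a five-entry
-- constant table keyed by the FREE TARGET with the divisor pre-folded (objective: simpler).
-- Python A mutates its dict argument in place and returns it; Python B performs the same
-- in-place mutation — the theorems are about the returned value.

-- ===== PORT A =====
structure PvOffer where
  quantity : Int
  price : Option Int
  free_item : Option String
  group : Option (List String)
  deriving Repr, DecidableEq

structure PvItemInfo where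
  price : Int
  offers : Option (List PvOffer)
  deriving Repr, DecidableEq

def PRICES : PySem.Dict String PvItemInfo := PySem.Dict.mk [
  ("A", ⟨50, some [⟨3, some 130, none, none⟩, ⟨5, some 200, none, none⟩]⟩),
  ("B", ⟨30, some [⟨2, some 45, none, none⟩]⟩),
  ("C", ⟨20, none⟩),
  ("D", ⟨15, none⟩),
  ("E", ⟨40, some [⟨2, none, some "B", none⟩]⟩),
  ("F", ⟨10, some [⟨2, none, some "F", none⟩]⟩),
  ("G", ⟨20, none⟩),
  ("H", ⟨10, some [⟨5, some 45, none, none⟩, ⟨10, some 80, none, none⟩]⟩),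
  ("I", ⟨35, none⟩),
  ("J", ⟨60, none⟩),
  ("K", ⟨70, some [⟨2, some 120, none, none⟩]⟩),
  ("L", ⟨90, none⟩),
  ("M", ⟨15, none⟩),
  ("N", ⟨40, some [⟨3, none, some "M", none⟩]⟩),
  ("O", ⟨10, none⟩),
  ("P", ⟨50, some [⟨5, some 200, none, none⟩]⟩),
  ("Q", ⟨30, some [⟨3, some 80, none, none⟩]⟩),
  ("R", ⟨50, some [⟨3, none, some "Q", none⟩]⟩),
  ("S", ⟨20, some [⟨3, some 45, none, some ["S", "T", "X", "Y", "Z"]⟩]⟩),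
  ("T", ⟨20, some [⟨3, some 45, none, some ["S", "T", "X", "Y", "Z"]⟩]⟩),
  ("U", ⟨40, some [⟨3, none, some "U", none⟩]⟩),
  ("V", ⟨50, some [⟨2, some 90, none, none⟩, ⟨3, some 130, none, none⟩]⟩),
  ("W", ⟨20, none⟩),
  ("X", ⟨17, some [⟨3, some 45, none, some ["S", "T", "X", "Y", "Z"]⟩]⟩),
  ("Y", ⟨20, some [⟨3, some 45, none, some ["S", "T", "X", "Y", "Z"]⟩]⟩),
  ("Z", ⟨21, some [⟨3, some 45, none, some ["S", "T", "X", "Y", "Z"]⟩]⟩)]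

-- 'FREE_ITEM_KEY in offer' is exactly 'offer.free_item.isSome' in this representation
def get_items_with_free_item : List String :=
  (PRICES.items.filter (fun p =>
     match p.2.offers with
     | some offers => decide (offers ≠ []) && offers.any (fun o => o.free_item.isSome)
     | none => false)).map (·.1)

def get_offer_with_free_item (offers : List PvOffer) : Option PvOffer :=
  offers.find? (fun o => o.free_item.isSome)

def apply_free_items (counted_items : List (String × Int)) : List (String × Int) :=
  (get_items_with_free_item.foldl (fun d item =>
      if d.contains item then
        match PRICES.get? item with
        | none => d  -- unreachable: item was taken from PRICES
        | some data =>
          match data.offers with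
          | none => d  -- unreachable: item has a free-item offer
          | some offers =>
            match get_offer_with_free_item offers with
            | none => d  -- unreachable
            | some offer =>
              match offer.free_item with
              | none => d  -- unreachable
              | some free_sku =>
                let offer_quantity := PySem.Int.floordiv (d.getD item 0)
                    (offer.quantity + (if item = free_sku then 1 else 0))
                if d.contains free_sku then
                  d.insert free_sku (d.getD free_sku 0 - min (d.getD free_sku 0) offer_quantity)
                else d
      else d)
    (PySem.Dict.mk counted_items)).items

-- ===== PORT B =====
def FREE_SOURCE_BY_TARGET : PySem.Dict String (String × Int) := PySem.Dict.mk
  [("B", ("E", 2)), ("F", ("F", 3)), ("M", ("N", 3)), ("Q", ("R", 3)), ("U", ("U", 4))]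

def apply_free_items_alt (counted_items : List (String × Int)) : List (String × Int) :=
  ((PySem.Dict.mk counted_items).keys.foldl
    (fun (dd : PySem.Dict String Int) sku =>
      match FREE_SOURCE_BY_TARGET.get? sku with
      | none => dd
      | some (src, dv) =>
        if dd.contains src then
          dd.insert sku (max 0 (dd.getD sku 0 - PySem.Int.floordiv (dd.getD src 0) dv))
        else dd)
    (PySem.Dict.mk counted_items)).items

-- ===== PRECONDITION & SPEC =====
-- Pre_ excludes association lists with duplicate keys: they do not represent a Python dict
-- (the argument's type), so neither program's behaviour on them is specified.
def Pre_apply_free_items (counted_items : List (String × Int)) : Prop :=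
  (counted_items.map Prod.fst).Nodup

instance (counted_items : List (String × Int)) : Decidable (Pre_apply_free_items counted_items) := by
  unfold Pre_apply_free_items; infer_instance

def pvWitness_apply_free_items : (List (String × Int)) := [("E", 5), ("B", 3), ("F", 7)]

def Spec_apply_free_items (counted_items : List (String × Int)) (out : List (String × Int)) : Prop := out = apply_free_items_alt counted_items
instance (counted_items : List (String × Int)) (out : List (String × Int)) : Decidable (Spec_apply_free_items counted_items out) := by unfold Spec_apply_free_items; infer_instance

-- ===== CLAIM (what is proved, stated in full; the proofs are below) =====
def Claim_equal_apply_free_items : Prop := ∀ (counted_items : List (String × Int)), Dom_apply_free_items counted_items → Pre_apply_free_items counted_items → Spec_apply_free_items counted_items (apply_free_items counted_items)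

-- ===== LEMMAS AND PROOFS =====

-- ---- A side: each of the five table-driven iterations of A is one 'stepA' ----
def stepA (s t : String) (q : Int) (d : PySem.Dict String Int) : PySem.Dict String Int :=
  if d.contains s then
    if d.contains t then
      d.insert t (d.getD t 0 - min (d.getD t 0) (PySem.Int.floordiv (d.getD s 0) q))
    else d
  else d

lemma A_chain (c : List (String × Int)) :
    apply_free_items c =
      (stepA "U" "U" 4 (stepA "R" "Q" 3 (stepA "N" "M" 3 (stepA "F" "F" 3
        (stepA "E" "B" 2 (PySem.Dict.mk c)))))).items := rfl

def pvF (t : String) (cond : Bool) (m : Int) : (String × Int) → (String × Int) :=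
  fun p => if p.1 = t ∧ cond then (t, p.2 - min p.2 m) else p

lemma stepA_keys (s t : String) (q : Int) (d : PySem.Dict String Int) :
    (stepA s t q d).keys = d.keys := by
  unfold stepA; split_ifs with h1 h2
  · exact PySem.Dict.keys_insert_of_contains d _ h2
  · rfl
  · rfl

lemma stepA_contains (s t : String) (q : Int) (d : PySem.Dict String Int) (x : String) :
    (stepA s t q d).contains x = d.contains x := by
  unfold stepA; split_ifs with h1 h2
  · rw [PySem.Dict.contains_insert]
    cases hx : (x == t)
    · simp
    · simp [eq_of_beq hx, h2]
  · rfl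
  · rfl

lemma stepA_getD_of_ne (s t : String) (q : Int) (d : PySem.Dict String Int) (x : String)
    (hx : x ≠ t) : (stepA s t q d).getD x 0 = d.getD x 0 := by
  unfold stepA; split_ifs
  · exact PySem.Dict.getD_insert_of_ne d _ _ hx
  · rfl
  · rfl

lemma stepA_items (s t : String) (q : Int) (d : PySem.Dict String Int) (hn : d.keys.Nodup) :
    (stepA s t q d).items
      = d.items.map (pvF t (d.contains s) (PySem.Int.floordiv (d.getD s 0) q)) := by
  unfold stepA
  split_ifs with h1 h2
  · rw [PySem.Dict.items_insert_of_contains _ _ h2]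
    apply List.map_congr_left
    intro p hp
    by_cases hpt : p.1 = t
    · have hv : d.getD t 0 = p.2 := by
        have := PySem.Dict.getD_of_mem_items (d := d) (k := p.1) (v := p.2) (by simpa using hp) hn (d0 := 0)
        rw [hpt] at this; exact this
      simp [pvF, hpt, h1, hv]
    · simp [pvF, hpt, beq_iff_eq]
  · -- t not present: no entry has key t
    have hkeys : ∀ p ∈ d.items, p.1 ≠ t := by
      intro p hp hpt
      have : d.contains t := by
        rw [PySem.Dict.contains_iff_mem_keys]
        simp only [PySem.Dict.keys]
        exact hpt ▸ List.mem_map_of_mem hp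
      simp [this] at h2
    conv_lhs => rw [show d.items = d.items.map id from (List.map_id _).symm]
    apply List.map_congr_left
    intro p hp
    simp [pvF, hkeys p hp]
  · conv_lhs => rw [show d.items = d.items.map id from (List.map_id _).symm]
    apply List.map_congr_left
    intro p hp
    simp [pvF, h1]

-- target -> (source, divisor) of the five free-item rules
def pvRule (k : String) : Option (String × Int) :=
  if k = "B" then some ("E", 2) else if k = "F" then some ("F", 3)
  else if k = "M" then some ("N", 3) else if k = "Q" then some ("R", 3)
  else if k = "U" then some ("U", 4) else none

def pvNew (d : PySem.Dict String Int) (k : String) (v : Int) : Int :=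
  match pvRule k with
  | none => v
  | some (s, q) =>
    match d.get? s with
    | none => v
    | some sv => v - min v (PySem.Int.floordiv sv q)

lemma pvComp (d0 : PySem.Dict String Int) (p : String × Int) :
    pvF "U" (d0.contains "U") (PySem.Int.floordiv (d0.getD "U" 0) 4)
      (pvF "Q" (d0.contains "R") (PySem.Int.floordiv (d0.getD "R" 0) 3)
        (pvF "M" (d0.contains "N") (PySem.Int.floordiv (d0.getD "N" 0) 3)
          (pvF "F" (d0.contains "F") (PySem.Int.floordiv (d0.getD "F" 0) 3)
            (pvF "B" (d0.contains "E") (PySem.Int.floordiv (d0.getD "E" 0) 2) p))))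
      = (p.1, pvNew d0 p.1 p.2) := by
  obtain ⟨k, v⟩ := p
  by_cases hB : k = "B"
  · subst hB
    rw [PySem.Dict.contains_eq_isSome_get? d0 "E"]
    cases hE : d0.get? "E" <;>
      simp [pvF, pvNew, pvRule, PySem.Dict.getD_eq_get?_getD, hE]
  by_cases hF : k = "F"
  · subst hF
    rw [PySem.Dict.contains_eq_isSome_get? d0 "F"]
    cases hs : d0.get? "F" <;>
      simp [pvF, pvNew, pvRule, PySem.Dict.getD_eq_get?_getD, hs]
  by_cases hM : k = "M"
  · subst hM
    rw [PySem.Dict.contains_eq_isSome_get? d0 "N"]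
    cases hs : d0.get? "N" <;>
      simp [pvF, pvNew, pvRule, PySem.Dict.getD_eq_get?_getD, hs]
  by_cases hQ : k = "Q"
  · subst hQ
    rw [PySem.Dict.contains_eq_isSome_get? d0 "R"]
    cases hs : d0.get? "R" <;>
      simp [pvF, pvNew, pvRule, PySem.Dict.getD_eq_get?_getD, hs]
  by_cases hU : k = "U"
  · subst hU
    rw [PySem.Dict.contains_eq_isSome_get? d0 "U"]
    cases hs : d0.get? "U" <;>
      simp [pvF, pvNew, pvRule, PySem.Dict.getD_eq_get?_getD, hs]
  · simp [pvF, pvNew, pvRule, hB, hF, hM, hQ, hU]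

lemma A_items (c : List (String × Int)) (hn : (c.map Prod.fst).Nodup) :
    apply_free_items c = c.map (fun p => (p.1, pvNew (PySem.Dict.mk c) p.1 p.2)) := by
  rw [A_chain]
  set d0 := PySem.Dict.mk c with hd0
  have hit0 : d0.items = c := rfl
  have hn0 : d0.keys.Nodup := by
    have : d0.keys = c.map Prod.fst := rfl
    rw [this]; exact hn
  set d1 := stepA "E" "B" 2 d0 with hd1
  set d2 := stepA "F" "F" 3 d1 with hd2
  set d3 := stepA "N" "M" 3 d2 with hd3
  set d4 := stepA "R" "Q" 3 d3 with hd4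
  have hn1 : d1.keys.Nodup := by rw [hd1, stepA_keys]; exact hn0
  have hn2 : d2.keys.Nodup := by rw [hd2, stepA_keys]; exact hn1
  have hn3 : d3.keys.Nodup := by rw [hd3, stepA_keys]; exact hn2
  have hn4 : d4.keys.Nodup := by rw [hd4, stepA_keys]; exact hn3
  have e1 : d1.items = d0.items.map (pvF "B" (d0.contains "E") (PySem.Int.floordiv (d0.getD "E" 0) 2)) :=
    stepA_items _ _ _ _ hn0
  have e2 : d2.items = d1.items.map (pvF "F" (d0.contains "F") (PySem.Int.floordiv (d0.getD "F" 0) 3)) := by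
    rw [hd2, stepA_items _ _ _ _ hn1, hd1, stepA_contains, stepA_getD_of_ne _ _ _ _ _ (by decide)]
  have e3 : d3.items = d2.items.map (pvF "M" (d0.contains "N") (PySem.Int.floordiv (d0.getD "N" 0) 3)) := by
    rw [hd3, stepA_items _ _ _ _ hn2, hd2, stepA_contains, stepA_getD_of_ne _ _ _ _ _ (by decide),
        hd1, stepA_contains, stepA_getD_of_ne _ _ _ _ _ (by decide)]
  have e4 : d4.items = d3.items.map (pvF "Q" (d0.contains "R") (PySem.Int.floordiv (d0.getD "R" 0) 3)) := by
    rw [hd4, stepA_items _ _ _ _ hn3, hd3, stepA_contains, stepA_getD_of_ne _ _ _ _ _ (by decide),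
        hd2, stepA_contains, stepA_getD_of_ne _ _ _ _ _ (by decide),
        hd1, stepA_contains, stepA_getD_of_ne _ _ _ _ _ (by decide)]
  have e5 : (stepA "U" "U" 4 d4).items = d4.items.map (pvF "U" (d0.contains "U") (PySem.Int.floordiv (d0.getD "U" 0) 4)) := by
    rw [stepA_items _ _ _ _ hn4, hd4, stepA_contains, stepA_getD_of_ne _ _ _ _ _ (by decide),
        hd3, stepA_contains, stepA_getD_of_ne _ _ _ _ _ (by decide),
        hd2, stepA_contains, stepA_getD_of_ne _ _ _ _ _ (by decide),
        hd1, stepA_contains, stepA_getD_of_ne _ _ _ _ _ (by decide)]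
  rw [e5, e4, e3, e2, e1, hit0, List.map_map, List.map_map, List.map_map, List.map_map]
  apply List.map_congr_left
  intro p _
  exact pvComp d0 p

-- ---- B side ----
lemma tbl_get (x : String) : FREE_SOURCE_BY_TARGET.get? x = pvRule x := by
  unfold pvRule
  split_ifs with h1 h2 h3 h4 h5
  · subst h1; decide
  · subst h2; decide
  · subst h3; decide
  · subst h4; decide
  · subst h5; decide
  · rw [show FREE_SOURCE_BY_TARGET = PySem.Dict.mk
        [("B", ("E", (2:Int))), ("F", ("F", 3)), ("M", ("N", 3)), ("Q", ("R", 3)), ("U", ("U", 4))] from rfl]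
    simp only [PySem.Dict.get?_mk_cons, beq_iff_eq]
    rw [if_neg (Ne.symm h1), if_neg (Ne.symm h2), if_neg (Ne.symm h3), if_neg (Ne.symm h4),
        if_neg (Ne.symm h5)]
    rfl

-- a rule's source is either no target itself or the rule is self-referential
lemma pvRule_src (x s : String) (q : Int) (h : pvRule x = some (s, q)) :
    pvRule s = none ∨ s = x := by
  unfold pvRule at h
  split_ifs at h <;>
    (simp only [Option.some.injEq, Prod.mk.injEq] at h
     obtain ⟨h1, h2⟩ := h; subst h1; simp_all [pvRule])

def pvStepB (dd : PySem.Dict String Int) (sku : String) : PySem.Dict String Int :=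
  match pvRule sku with
  | none => dd
  | some (src, dv) =>
    if dd.contains src then
      dd.insert sku (max 0 (dd.getD sku 0 - PySem.Int.floordiv (dd.getD src 0) dv))
    else dd

-- the closed form of one B update, reading source data from dd
def pvG (dd : PySem.Dict String Int) (k : String) (v : Int) : Int :=
  match pvRule k with
  | none => v
  | some (s, q) =>
    if dd.contains s then max 0 (v - PySem.Int.floordiv (dd.getD s 0) q) else v

lemma pvG_insert (dd : PySem.Dict String Int) (k : String) (v' : Int) (x : String) (w : Int)
    (hk : pvRule k ≠ none) (hx : x ≠ k) : pvG (dd.insert k v') x w = pvG dd x w := by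
  unfold pvG
  rcases hr : pvRule x with _ | ⟨s, q⟩
  · rfl
  · show (if (dd.insert k v').contains s = true
        then max 0 (w - PySem.Int.floordiv ((dd.insert k v').getD s 0) q) else w)
      = (if dd.contains s = true then max 0 (w - PySem.Int.floordiv (dd.getD s 0) q) else w)
    have hsk : s ≠ k := by
      rcases pvRule_src x s q hr with h | h
      · intro he; exact hk (he ▸ h)
      · exact h ▸ hx
    have hb : (s == k) = false := by simpa using hsk
    rw [PySem.Dict.contains_insert, hb, Bool.false_or, PySem.Dict.getD_insert_of_ne dd _ _ hsk]

lemma B_fold_items (l : List String) (dd : PySem.Dict String Int)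
    (hnd : dd.keys.Nodup) (hl : l.Nodup) (hsub : ∀ k ∈ l, dd.contains k = true) :
    (l.foldl pvStepB dd).items
      = dd.items.map (fun p => if p.1 ∈ l then (p.1, pvG dd p.1 p.2) else p) := by
  induction l generalizing dd with
  | nil => simp
  | cons k l ih =>
    simp only [List.nodup_cons] at hl
    obtain ⟨hkl, hl'⟩ := hl
    simp only [List.foldl_cons]
    have hck : dd.contains k = true := hsub k List.mem_cons_self
    rcases hr : pvRule k with _ | ⟨s, q⟩
    · -- no rule for k: the step is the identity
      have hstep : pvStepB dd k = dd := by unfold pvStepB; rw [hr]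
      rw [hstep, ih dd hnd hl' (fun r hrm => hsub r (List.mem_cons_of_mem _ hrm))]
      apply List.map_congr_left
      intro p hp
      by_cases hpk : p.1 = k
      · have hval : pvG dd p.1 p.2 = p.2 := by unfold pvG; rw [hpk, hr]
        rw [if_neg (hpk ▸ hkl), if_pos (List.mem_cons.2 (Or.inl hpk)), hval]
      · simp [List.mem_cons, hpk]
    · by_cases hcs : dd.contains s
      · -- rule fires: dd gets updated at k
        set v' := max 0 (dd.getD k 0 - PySem.Int.floordiv (dd.getD s 0) q) with hv'
        have hstep : pvStepB dd k = dd.insert k v' := by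
          unfold pvStepB
          rw [hr]
          show (if dd.contains s = true
              then dd.insert k (max 0 (dd.getD k 0 - PySem.Int.floordiv (dd.getD s 0) q))
              else dd) = dd.insert k v'
          rw [if_pos hcs, hv']
        have hkeys : (dd.insert k v').keys = dd.keys := PySem.Dict.keys_insert_of_contains dd _ hck
        have hnd' : (dd.insert k v').keys.Nodup := hkeys ▸ hnd
        have hsub' : ∀ r ∈ l, (dd.insert k v').contains r = true := by
          intro r hrm
          rw [PySem.Dict.contains_insert]
          simp [hsub r (List.mem_cons_of_mem _ hrm)]
        rw [hstep, ih _ hnd' hl' hsub', PySem.Dict.items_insert_of_contains dd _ hck, List.map_map]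
        apply List.map_congr_left
        intro p hp
        by_cases hpk : p.1 = k
        · have hv : dd.getD k 0 = p.2 := by
            have := PySem.Dict.getD_of_mem_items (d := dd) (k := p.1) (v := p.2)
              (by simpa using hp) hnd (d0 := 0)
            rw [hpk] at this; exact this
          have hval : pvG dd k p.2 = v' := by
            unfold pvG
            rw [hr]
            show (if dd.contains s = true
                then max 0 (p.2 - PySem.Int.floordiv (dd.getD s 0) q) else p.2) = v'
            rw [if_pos hcs, hv', hv]
          simp only [Function.comp_apply, hpk, beq_self_eq_true, if_true]
          rw [if_neg hkl, if_pos List.mem_cons_self, hval]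
        · have hne : (p.1 == k) = false := by simpa using hpk
          simp only [Function.comp_apply, hne, Bool.false_eq_true, if_false, List.mem_cons]
          by_cases hpl : p.1 ∈ l
          · rw [if_pos hpl, if_pos (Or.inr hpl),
                pvG_insert dd k v' p.1 p.2 (by rw [hr]; simp) hpk]
          · rw [if_neg hpl, if_neg (by rintro (h | h); exact hpk h; exact hpl h)]
      · -- rule present but source absent: the step is the identity
        have hstep : pvStepB dd k = dd := by unfold pvStepB; rw [hr]; simp [hcs]
        rw [hstep, ih dd hnd hl' (fun r hrm => hsub r (List.mem_cons_of_mem _ hrm))]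
        apply List.map_congr_left
        intro p hp
        by_cases hpk : p.1 = k
        · have hval : pvG dd p.1 p.2 = p.2 := by unfold pvG; rw [hpk, hr]; simp [hcs]
          rw [if_neg (hpk ▸ hkl), if_pos (List.mem_cons.2 (Or.inl hpk)), hval]
        · simp [List.mem_cons, hpk]

lemma B_items (c : List (String × Int)) (hn : (c.map Prod.fst).Nodup) :
    apply_free_items_alt c = c.map (fun p => (p.1, pvG (PySem.Dict.mk c) p.1 p.2)) := by
  have hbody : (fun (dd : PySem.Dict String Int) (sku : String) =>
      match FREE_SOURCE_BY_TARGET.get? sku with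
      | none => dd
      | some (src, dv) =>
        if dd.contains src then
          dd.insert sku (max 0 (dd.getD sku 0 - PySem.Int.floordiv (dd.getD src 0) dv))
        else dd) = pvStepB := by
    funext dd sku
    unfold pvStepB
    rw [tbl_get]
  have hkeysmk : (PySem.Dict.mk c).keys = c.map Prod.fst := rfl
  have hitemsmk : (PySem.Dict.mk c).items = c := rfl
  have hunfold : apply_free_items_alt c =
      ((PySem.Dict.mk c).keys.foldl pvStepB (PySem.Dict.mk c)).items := by
    rw [← hbody]; rfl
  rw [hunfold,
    B_fold_items (PySem.Dict.mk c).keys (PySem.Dict.mk c) (hkeysmk ▸ hn) (hkeysmk ▸ hn)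
      (fun k hk => (PySem.Dict.contains_iff_mem_keys _ _).2 hk), hitemsmk]
  apply List.map_congr_left
  intro p hp
  rw [if_pos (by rw [hkeysmk]; exact List.mem_map_of_mem hp)]

lemma pv_sub_min_eq_max (v m : Int) : v - min v m = max 0 (v - m) := by
  rcases le_total v m with h | h
  · rw [min_eq_left h, max_eq_left (by omega)]; omega
  · rw [min_eq_right h, max_eq_right (by omega)]

-- ===== VERDICT (by name: the statement is the Claim_ definition above) =====
theorem apply_free_items_spec : Claim_equal_apply_free_items := by
  unfold Claim_equal_apply_free_items
  intro c _ hpre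
  unfold Pre_apply_free_items at hpre
  unfold Spec_apply_free_items
  rw [A_items c hpre, B_items c hpre]
  apply List.map_congr_left
  intro p _
  unfold pvNew pvG
  rcases hr : pvRule p.1 with _ | ⟨s, q⟩
  · rfl
  · show (p.1, match (PySem.Dict.mk c).get? s with
        | none => p.2
        | some sv => p.2 - min p.2 (PySem.Int.floordiv sv q))
      = (p.1, if (PySem.Dict.mk c).contains s = true
          then max 0 (p.2 - PySem.Int.floordiv ((PySem.Dict.mk c).getD s 0) q) else p.2)
    rw [PySem.Dict.contains_eq_isSome_get?, PySem.Dict.getD_eq_get?_getD]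
    rcases hs : (PySem.Dict.mk c).get? s with _ | sv
    · rfl
    · simp only [Option.isSome_some, if_true, Option.getD_some]
      rw [pv_sub_min_eq_max]
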